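-- pv_equiv track=rewrite | github.com/btezzxxt/leetcode-python | playground.py | bs_min_i_eq_key
-- ===== SOURCE A (Python) =====
-- def bs_min_i_eq_key(nums, key):
--     l=0
--     r=len(nums)-1
--     while l<r:
--         m=l+(r-l)//2
--         if nums[m]<key:
--             l=m+1
--         else:
--             r=m
--     if(nums[r]==key):
--         return r
--     return -1
-- ===== SOURCE B (Python) =====
-- def bs_min_i_eq_key(nums, key):
--     def go(l, r):
--         if l >= r:
--             return r if nums[r] == key else -1
--         m = l + (r - l) // 2
--         if nums[m] < key:
--             return go(m + 1, r)
--         return go(l, m)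
--     return go(0, len(nums) - 1)
-- ===== Notes on version B (the rewrite author's own statement) =====
-- stated objective: alternative
-- what changed: The iterative while-loop with mutable l/r and a post-loop check is recast as a recursive divide-and-conquer helper go(l, r) that shrinks the closed interval by tail recursion and performs the found/not-found check in its base case.
import Mathlib
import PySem

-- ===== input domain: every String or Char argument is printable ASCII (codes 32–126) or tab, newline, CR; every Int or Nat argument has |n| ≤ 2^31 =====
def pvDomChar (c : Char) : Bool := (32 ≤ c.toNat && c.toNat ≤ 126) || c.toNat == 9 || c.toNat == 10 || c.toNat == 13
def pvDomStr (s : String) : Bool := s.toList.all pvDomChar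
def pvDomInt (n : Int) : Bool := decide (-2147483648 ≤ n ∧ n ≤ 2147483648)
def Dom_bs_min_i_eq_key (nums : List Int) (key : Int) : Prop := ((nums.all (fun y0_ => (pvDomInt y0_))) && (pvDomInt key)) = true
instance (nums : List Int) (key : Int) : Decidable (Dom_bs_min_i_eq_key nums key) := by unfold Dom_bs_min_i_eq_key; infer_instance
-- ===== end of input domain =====

-- B recasts A's iterative while-loop as a recursive divide-and-conquer helper with the
-- found/not-found check in its base case (objective: alternative decomposition, same cost).
-- Both recursions carry a Nat fuel only as a totality guard (fuel = nums.length always suffices).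

-- ===== PORT A =====
-- A's while loop: mutable (l, r) narrowed until l < r fails; returns the final (l, r).
-- The 'none' branch marks an in-loop IndexError; it is unreachable from bs_min_i_eq_key's call.
def bsALoop (nums : List Int) (key : Int) : Nat → Int → Int → Int × Int
  | 0, l, r => (l, r)
  | fuel + 1, l, r =>
    if l < r then
      let m := l + PySem.Int.floordiv (r - l) 2
      match PySem.List.pyGet? nums m with
      | some v =>
          if v < key then bsALoop nums key fuel (m + 1) r else bsALoop nums key fuel l m
      | none => (l, r)
    else (l, r)

def bs_min_i_eq_key (nums : List Int) (key : Int) : Int :=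
  let lr := bsALoop nums key nums.length 0 ((nums.length : Int) - 1)
  -- nums[r] == key check after the loop; 'none' = IndexError (empty nums), excluded by Pre_
  match PySem.List.pyGet? nums lr.2 with
  | some v => if v == key then lr.2 else -1
  | none => -1

-- ===== PORT B =====
-- B's recursive go(l, r): base case checks nums[r]; 'none' = IndexError (empty nums), excluded by Pre_.
def bsBGo (nums : List Int) (key : Int) : Nat → Int → Int → Int
  | fuel + 1, l, r =>
    if l < r then
      let m := l + PySem.Int.floordiv (r - l) 2
      match PySem.List.pyGet? nums m with
      | some v =>
          if v < key then bsBGo nums key fuel (m + 1) r else bsBGo nums key fuel l m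
      | none => -1
    else
      match PySem.List.pyGet? nums r with
      | some v => if v == key then r else -1
      | none => -1
  | 0, _, r =>
      match PySem.List.pyGet? nums r with
      | some v => if v == key then r else -1
      | none => -1

def bs_min_i_eq_key_alt (nums : List Int) (key : Int) : Int :=
  bsBGo nums key nums.length 0 ((nums.length : Int) - 1)

-- ===== PRECONDITION & SPEC =====
-- Pre_ excludes only the empty list, on which Python A raises IndexError (nums[-1] after the loop).
def Pre_bs_min_i_eq_key (nums : List Int) (key : Int) : Prop := nums ≠ []
instance (nums : List Int) (key : Int) : Decidable (Pre_bs_min_i_eq_key nums key) := by unfold Pre_bs_min_i_eq_key; infer_instance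
def pvWitness_bs_min_i_eq_key : List Int × Int := ([1, 2, 2, 3], 2)

def Spec_bs_min_i_eq_key (nums : List Int) (key : Int) (out : Int) : Prop := out = bs_min_i_eq_key_alt nums key
instance (nums : List Int) (key : Int) (out : Int) : Decidable (Spec_bs_min_i_eq_key nums key out) := by unfold Spec_bs_min_i_eq_key; infer_instance

-- ===== CLAIM (what is proved, stated in full; the proofs are below) =====
def Claim_equal_bs_min_i_eq_key : Prop := ∀ (nums : List Int) (key : Int), Dom_bs_min_i_eq_key nums key → Pre_bs_min_i_eq_key nums key → Spec_bs_min_i_eq_key nums key (bs_min_i_eq_key nums key)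

-- ===== LEMMAS AND PROOFS =====

-- With enough fuel and 0 ≤ l ≤ r < len, B's recursion computes exactly A's loop followed by A's post-loop check.
theorem bsBGo_eq_loop (nums : List Int) (key : Int) :
    ∀ fuel (l r : Int), (r - l).toNat ≤ fuel → 0 ≤ l → l ≤ r → r < (nums.length : Int) →
      bsBGo nums key fuel l r =
        (match PySem.List.pyGet? nums (bsALoop nums key fuel l r).2 with
         | some v => if v == key then (bsALoop nums key fuel l r).2 else -1
         | none => -1) := by
  intro fuel
  induction fuel with
  | zero =>
    intro l r hn hl0 hlr hrlen
    have : l = r := by omega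
    subst this
    rfl
  | succ fuel ih =>
    intro l r hn hl0 hlr hrlen
    by_cases h : l < r
    · have hm := PySem.Int.floordiv_mul_add_mod (r - l) 2
      have hm1 := PySem.Int.mod_nonneg (a := r - l) (b := 2) (by omega)
      have hm2 := PySem.Int.mod_lt (a := r - l) (b := 2) (by omega)
      set m := l + PySem.Int.floordiv (r - l) 2 with hmdef
      have hmr : l ≤ m ∧ m < r := by constructor <;> omega
      have hv := PySem.List.pyGet?_eq_some_getElem (xs := nums) (i := m) (by omega) (by omega)
      rw [bsBGo, bsALoop]
      simp only [if_pos h, ← hmdef, hv]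
      by_cases hvk : nums[m.toNat] < key
      · rw [if_pos hvk, if_pos hvk]
        exact ih (m + 1) r (by omega) (by omega) (by omega) hrlen
      · rw [if_neg hvk, if_neg hvk]
        exact ih l m (by omega) hl0 (by omega) (by omega)
    · rw [bsBGo, bsALoop]
      simp only [if_neg h]

-- ===== VERDICT (by name: the statement is the Claim_ definition above) =====
theorem bs_min_i_eq_key_spec : Claim_equal_bs_min_i_eq_key := by
  intro nums key _hdom hpre
  unfold Spec_bs_min_i_eq_key bs_min_i_eq_key bs_min_i_eq_key_alt
  have hlen : 0 < (nums.length : Int) := by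
    have : nums.length ≠ 0 := fun h => hpre (List.eq_nil_of_length_eq_zero h)
    omega
  exact (bsBGo_eq_loop nums key nums.length 0 ((nums.length : Int) - 1) (by omega) (by omega) (by omega) (by omega)).symm
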